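-- pv_equiv track=rewrite | github.com/Tenxhy/Codice-Fiscale | CalcoloCodice.py | __calcolo_nome
-- ===== SOURCE A (Python) =====
-- def __calcolo_nome(nome: str) -> str:
--     compnom = ""
--     check = 0
--     for  i in nome:
--         if not(i == "A" or i == "E" or i == "I" or i == "O" or i == "U"):
--             compnom = compnom+i
--
--     if len(compnom)<4:
--         for  i in nome:
--             if i == "A" or i == "E" or i == "I" or i == "O" or i == "U":
--                 compnom = compnom+i
--
--         check = 1
--         compnom = compnom+"XXX"
--
--     if check == 0:
--         comp2 = compnom[:1]+compnom[2:4]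
--     else:
--         comp2 = compnom[:3]
--
--     return comp2
-- ===== SOURCE B (Python) =====
-- def __calcolo_nome(nome: str) -> str:
--     # Stable sort with a boolean key arranges all non-vowels (in order) before
--     # all vowels (in order); pad with XXX and select positions directly.
--     arranged = sorted(nome, key=lambda c: c in "AEIOU") + ["X", "X", "X"]
--     ncons = sum(c not in "AEIOU" for c in nome)
--     if ncons >= 4:
--         return arranged[0] + arranged[2] + arranged[3]
--     return "".join(arranged[:3])
-- ===== Notes on version B (the rewrite author's own statement) =====
-- stated objective: alternative
-- what changed: B arranges the characters with one stable sort keyed on vowel membership (non-vowels first in original order, then vowels), pads with XXX, counts non-vowels, and selects the output positions directly, replacing A's two conditional append scans, check flag and slice arithmetic.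
import Mathlib
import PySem

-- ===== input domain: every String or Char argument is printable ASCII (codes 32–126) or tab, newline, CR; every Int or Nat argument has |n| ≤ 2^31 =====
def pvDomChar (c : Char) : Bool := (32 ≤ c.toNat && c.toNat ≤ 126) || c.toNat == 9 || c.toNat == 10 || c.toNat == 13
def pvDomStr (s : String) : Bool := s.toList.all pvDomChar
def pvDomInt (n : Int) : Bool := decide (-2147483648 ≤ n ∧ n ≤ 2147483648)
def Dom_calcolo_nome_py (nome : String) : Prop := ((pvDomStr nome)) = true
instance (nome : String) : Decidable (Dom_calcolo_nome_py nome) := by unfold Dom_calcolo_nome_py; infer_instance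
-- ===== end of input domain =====

-- B replaces A's two conditional scans and slice arithmetic by ONE stable sort with a
-- boolean vowel key (non-vowels first, original order kept) plus direct position selection
-- (objective: alternative — a sort-based arrangement instead of scan-and-slice).

def pvIsVowel (c : Char) : Bool := c == 'A' || c == 'E' || c == 'I' || c == 'O' || c == 'U'

-- ===== PORT A =====
-- first loop: append every non-vowel of nome to compnom;
-- second loop (only when len(compnom) < 4): append the vowels, set check, append "XXX";
-- then the slice arithmetic, exactly as in the Python
def calcolo_nome_py (nome : String) : String :=
  let compnom : List Char := nome.toList.foldl
    (fun acc i => if !pvIsVowel i then acc ++ [i] else acc) []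
  let st : List Char × Nat :=
    if compnom.length < 4 then
      ((nome.toList.foldl
          (fun acc i => if pvIsVowel i then acc ++ [i] else acc) compnom)
        ++ ['X','X','X'], 1)
    else (compnom, 0)
  let comp2 : List Char :=
    if st.2 = 0 then
      PySem.List.slice st.1 none (some 1) ++ PySem.List.slice st.1 (some 2) (some 4)
    else
      PySem.List.slice st.1 none (some 3)
  String.ofList comp2

-- ===== PORT B =====
-- sorted(nome, key=lambda c: c in "AEIOU") is PySem.List.sorted with the Bool key
-- (False < True, stable); then pad with XXX, count non-vowels, and pick positions.
def calcolo_nome_py_alt (nome : String) : String :=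
  let arranged : List Char :=
    PySem.List.sorted nome.toList (fun c => pvIsVowel c) false ++ ['X','X','X']
  let ncons : Nat := nome.toList.countP (fun c => !pvIsVowel c)
  if 4 ≤ ncons then
    String.ofList [arranged[0]!, arranged[2]!, arranged[3]!]
  else
    String.ofList (arranged.take 3)

-- ===== PRECONDITION & SPEC =====
def Spec_calcolo_nome_py (nome : String) (out : String) : Prop := out = calcolo_nome_py_alt nome
instance (nome : String) (out : String) : Decidable (Spec_calcolo_nome_py nome out) := by unfold Spec_calcolo_nome_py; infer_instance

-- ===== CLAIM (what is proved, stated in full; the proofs are below) =====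
def Claim_equal_calcolo_nome_py : Prop := ∀ (nome : String), Dom_calcolo_nome_py nome → Spec_calcolo_nome_py nome (calcolo_nome_py nome)

-- ===== LEMMAS AND PROOFS =====

theorem foldl_append_if_filter (p : Char → Bool) (l acc : List Char) :
    l.foldl (fun acc i => if p i then acc ++ [i] else acc) acc = acc ++ l.filter p := by
  induction l generalizing acc with
  | nil => simp
  | cons c t ih =>
    by_cases h : p c <;> simp [List.foldl, h, ih]

-- inserting a non-vowel into (non-vowels ++ vowels) lands right after the non-vowels
theorem insertBy_cons_mid (x : Char) (hx : pvIsVowel x = false)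
    (cs vs : List Char) (hc : ∀ c ∈ cs, pvIsVowel c = false) (hv : ∀ v ∈ vs, pvIsVowel v = true) :
    PySem.List.insertBy (fun a b => decide ((pvIsVowel a) < (pvIsVowel b))) x (cs ++ vs)
      = cs ++ [x] ++ vs := by
  induction cs with
  | nil =>
    cases vs with
    | nil => simp [PySem.List.insertBy]
    | cons v vt =>
      have := hv v (by simp)
      simp [PySem.List.insertBy, this, hx]
  | cons c ct ih =>
    have hcc := hc c (by simp)
    simp only [List.cons_append, PySem.List.insertBy, hcc, hx]
    simp only [show decide ((false : Bool) < false) = false by decide]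
    rw [ih (fun a ha => hc a (by simp [ha]))]
    simp

-- a vowel is never "before" anything with a Bool key, so it is appended at the end
theorem insertBy_vowel_end (x : Char) (hx : pvIsVowel x = true) (l : List Char) :
    PySem.List.insertBy (fun a b => decide ((pvIsVowel a) < (pvIsVowel b))) x l = l ++ [x] := by
  apply PySem.List.insertBy_of_forall_not_before
  intro y _
  simp [hx]

-- the insertion-sort fold with the vowel key performs a stable partition
theorem foldl_insertBy_partition (l cs vs : List Char)
    (hc : ∀ c ∈ cs, pvIsVowel c = false) (hv : ∀ v ∈ vs, pvIsVowel v = true) :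
    l.foldl (fun acc x => PySem.List.insertBy (fun a b => decide ((pvIsVowel a) < (pvIsVowel b))) x acc) (cs ++ vs)
      = (cs ++ l.filter (fun c => !pvIsVowel c)) ++ (vs ++ l.filter pvIsVowel) := by
  induction l generalizing cs vs with
  | nil => simp
  | cons x t ih =>
    rw [List.foldl]
    by_cases hx : pvIsVowel x = true
    · rw [insertBy_vowel_end x hx (cs ++ vs), List.append_assoc,
          ih cs (vs ++ [x]) hc (by intro v hvv
                                   rcases List.mem_append.mp hvv with h | h
                                   · exact hv v h
                                   · simp at h; subst h; exact hx)]
      simp [hx]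
    · have hx' : pvIsVowel x = false := by simpa using hx
      rw [insertBy_cons_mid x hx' cs vs hc hv,
          ih (cs ++ [x]) vs (by intro c hcc
                                rcases List.mem_append.mp hcc with h | h
                                · exact hc c h
                                · simp at h; subst h; exact hx') hv]
      simp [hx']

theorem sorted_vowel_key (l : List Char) :
    PySem.List.sorted l (fun c => pvIsVowel c) false
      = l.filter (fun c => !pvIsVowel c) ++ l.filter pvIsVowel := by
  rw [PySem.List.sorted_eq_foldl_insertBy]
  simpa using foldl_insertBy_partition l [] [] (by simp) (by simp)

theorem calcolo_nome_py_spec' (nome : String) :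
    calcolo_nome_py nome = calcolo_nome_py_alt nome := by
  unfold calcolo_nome_py calcolo_nome_py_alt
  rw [sorted_vowel_key]
  simp only [foldl_append_if_filter, List.nil_append]
  have hcount : nome.toList.countP (fun c => !pvIsVowel c)
      = (nome.toList.filter (fun c => !pvIsVowel c)).length := List.countP_eq_length_filter ..
  rw [hcount]
  generalize List.filter (fun i => !pvIsVowel i) nome.toList = cs
  generalize List.filter pvIsVowel nome.toList = vs
  by_cases h : cs.length < 4
  · simp only [if_pos h, if_neg (by omega : ¬ 4 ≤ cs.length)]
    have h3 : ((3 : Int)) = ((3 : Nat) : Int) := by norm_num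
    simp only [h3, PySem.List.slice_to_natCast, List.append_assoc]
    simp
  · simp only [if_neg h, if_pos (by omega : 4 ≤ cs.length)]
    have h4 : 4 ≤ cs.length := by omega
    obtain ⟨a, b, c, d, t, rfl⟩ : ∃ a b c d t, cs = a :: b :: c :: d :: t := by
      match cs, h4 with
      | a :: b :: c :: d :: t, _ => exact ⟨a, b, c, d, t, rfl⟩
    have h1 : ((1 : Int)) = ((1 : Nat) : Int) := by norm_num
    have h24 : PySem.List.slice (a :: b :: c :: d :: t) (some 2) (some 4) = [c, d] := by
      rw [show ((2:Int)) = ((2:Nat):Int) from by norm_num,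
          show ((4:Int)) = ((4:Nat):Int) from by norm_num,
          PySem.List.slice_natCast]
      simp
    simp only [h1, PySem.List.slice_to_natCast, h24]
    simp

-- ===== VERDICT (by name: the statement is the Claim_ definition above) =====
theorem calcolo_nome_py_spec : Claim_equal_calcolo_nome_py := by
  intro nome _
  show calcolo_nome_py nome = calcolo_nome_py_alt nome
  exact calcolo_nome_py_spec' nome
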